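-- pv_equiv track=rewrite | github.com/hyeokjinson/algorithm | 히츠 코테.py | solve
-- ===== SOURCE A (Python) =====
-- def solve(s):
--     mod = 10 ** 9 + 7
--
--     s1 = s.count('1')
--
--     if s1 % 3:
--         return 0
--     s1 //= 3
--
--     if s1 == 0:
--         return (len(s) - 1) * (len(s) - 2) // 2 % mod
--
--     cnt = lt = rt = 0
--
--     for x in s:
--         if x == '1':
--             cnt += 1
--         if cnt == s1:
--             lt += 1
--         elif cnt == 2 * s1:
--             rt += 1
--     return lt * rt % mod
-- ===== SOURCE B (Python) =====
-- def solve(s):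
--     mod = 10 ** 9 + 7
--     ones = [i for i, c in enumerate(s) if c == '1']
--     total = len(ones)
--     if total % 3:
--         return 0
--     k = total // 3
--     if k == 0:
--         return (len(s) - 1) * (len(s) - 2) // 2 % mod
--     return (ones[k] - ones[k - 1]) * (ones[2 * k] - ones[2 * k - 1]) % mod
-- ===== Notes on version B (the rewrite author's own statement) =====
-- stated objective: alternative
-- what changed: B builds the list of positions of the set bits once and reads the two boundary gaps ones[k]-ones[k-1] and ones[2k]-ones[2k-1] directly, instead of A's running lt/rt counters updated on every character.
import Mathlib
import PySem

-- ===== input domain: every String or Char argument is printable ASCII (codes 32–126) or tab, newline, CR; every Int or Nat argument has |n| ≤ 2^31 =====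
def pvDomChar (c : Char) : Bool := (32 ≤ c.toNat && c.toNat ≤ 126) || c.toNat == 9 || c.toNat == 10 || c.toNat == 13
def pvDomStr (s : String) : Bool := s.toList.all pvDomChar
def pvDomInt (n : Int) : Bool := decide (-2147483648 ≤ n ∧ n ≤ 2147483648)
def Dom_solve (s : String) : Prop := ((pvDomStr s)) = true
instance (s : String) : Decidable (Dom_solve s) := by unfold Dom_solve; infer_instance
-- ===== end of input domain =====

-- B replaces A's running lt/rt counters by the two boundary gaps read off the list of
-- positions of the set bits: an alternative decomposition of the same computation.

-- ===== PORT A =====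
def solve (s : String) : Int :=
  let md : Int := 10 ^ 9 + 7
  let s1 : Int := (PySem.Str.count s "1" : Int)
  if PySem.Int.mod s1 3 ≠ 0 then 0
  else
    let s1 := PySem.Int.floordiv s1 3
    if s1 = 0 then
      PySem.Int.mod (PySem.Int.floordiv ((PySem.Str.len s - 1) * (PySem.Str.len s - 2)) 2) md
    else
      let st := s.toList.foldl (fun (p : Int × Int × Int) x =>
        let cnt := if x = '1' then p.1 + 1 else p.1
        if cnt = s1 then (cnt, p.2.1 + 1, p.2.2)
        else if cnt = 2 * s1 then (cnt, p.2.1, p.2.2 + 1)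
        else (cnt, p.2.1, p.2.2)) (0, 0, 0)
      PySem.Int.mod (st.2.1 * st.2.2) md

-- ===== PORT B =====
def solve_alt (s : String) : Int :=
  let md : Int := 10 ^ 9 + 7
  let ones : List Int := ((PySem.List.enumerate s.toList).filter (fun p => p.2 = '1')).map (·.1)
  let total : Int := (ones.length : Int)
  if PySem.Int.mod total 3 ≠ 0 then 0
  else
    let k := PySem.Int.floordiv total 3
    if k = 0 then
      PySem.Int.mod (PySem.Int.floordiv ((PySem.Str.len s - 1) * (PySem.Str.len s - 2)) 2) md
    else
      PySem.Int.mod ((PySem.List.pyGetD ones k 0 - PySem.List.pyGetD ones (k - 1) 0) *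
        (PySem.List.pyGetD ones (2 * k) 0 - PySem.List.pyGetD ones (2 * k - 1) 0)) md

-- ===== PRECONDITION & SPEC =====
def Spec_solve (s : String) (out : Int) : Prop := out = solve_alt s
instance (s : String) (out : Int) : Decidable (Spec_solve s out) := by unfold Spec_solve; infer_instance

-- ===== CLAIM (what is proved, stated in full; the proofs are below) =====
def Claim_equal_solve : Prop := ∀ (s : String), Dom_solve s → Spec_solve s (solve s)

-- ===== LEMMAS AND PROOFS =====

def cntPref (t : Int) : List Char → Int → Int
  | [], _ => 0
  | x :: cs, c =>
    let c' := if x = '1' then c + 1 else c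
    (if c' = t then 1 else 0) + cntPref t cs c'
def posOne : Nat → List Char → Int
  | 0, _ => 0
  | _, [] => 0
  | j + 1, x :: cs => if x = '1' then (if j = 0 then 0 else 1 + posOne j cs) else 1 + posOne (j + 1) cs

lemma cntPref_zero (t : Int) : ∀ (cs : List Char) (c : Int), t < c → cntPref t cs c = 0 := by
  intro cs
  induction cs with
  | nil => intro c _; rfl
  | cons x cs ih =>
    intro c hc
    by_cases hx : x = '1'
    · subst hx
      simp [cntPref, if_neg (by omega : ¬ (c + 1 = t)), ih _ (by omega : t < c + 1)]
    · simp [cntPref, hx, if_neg (by omega : ¬ (c = t)), ih _ hc]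

lemma cntPref_self (t : Int) : ∀ (cs : List Char), 1 ≤ cs.count '1' →
    cntPref t cs t = posOne 1 cs := by
  intro cs
  induction cs with
  | nil => simp
  | cons x cs ih =>
    intro hc
    by_cases hx : x = '1'
    · subst hx
      simp [cntPref, posOne, cntPref_zero t cs (t + 1) (by omega)]
    · have hc' : 1 ≤ cs.count '1' := by simpa [List.count_cons, hx] using hc
      simp [cntPref, posOne, hx, ih hc']

lemma cntPref_gap (t : Int) : ∀ (cs : List Char) (e : Nat) (c : Int),
    e + 2 ≤ cs.count '1' → t = c + (e + 1) →
    cntPref t cs c = posOne (e + 2) cs - posOne (e + 1) cs := by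
  intro cs
  induction cs with
  | nil => intro e c hcount _; simp at hcount
  | cons x cs ih =>
    intro e c hcount ht
    by_cases hx : x = '1'
    · subst hx
      have hcnt' : e + 1 ≤ cs.count '1' := by
        simp at hcount; omega
      cases e with
      | zero =>
        subst ht
        simp [cntPref, posOne, cntPref_self _ cs hcnt']
      | succ f =>
        subst ht
        have hih := ih f (c + 1) hcnt' (by push_cast; ring)
        simp only [cntPref, posOne, reduceIte]
        rw [if_neg (by push_cast; omega : ¬ ((c:Int) + 1 = c + (↑(f+1) + 1))), hih,
          if_neg (by omega : ¬ (f + 1 = 0))]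
        push_cast
        omega
    · have hcnt' : e + 2 ≤ cs.count '1' := by
        simpa [List.count_cons, hx] using hcount
      have := ih e c hcnt' ht
      simp only [cntPref, posOne, if_neg hx]
      rw [if_neg (by omega : ¬ (c = t)), this]
      have h2 : posOne (e + 1 + 1) cs = posOne (e + 2) cs := rfl
      omega

lemma loopA (t : Int) (ht : 1 ≤ t) : ∀ (cs : List Char) (c lt rt : Int),
    cs.foldl (fun (p : Int × Int × Int) x =>
        let cnt := if x = '1' then p.1 + 1 else p.1
        if cnt = t then (cnt, p.2.1 + 1, p.2.2)
        else if cnt = 2 * t then (cnt, p.2.1, p.2.2 + 1)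
        else (cnt, p.2.1, p.2.2)) (c, lt, rt)
      = (c + (cs.count '1' : Int), lt + cntPref t cs c, rt + cntPref (2 * t) cs c) := by
  intro cs
  induction cs with
  | nil => intro c lt rt; simp [cntPref]
  | cons x cs ih =>
    intro c lt rt
    by_cases hx : x = '1'
    · subst hx
      simp only [List.foldl_cons, cntPref, reduceIte]
      split_ifs with h1 h2 <;> rw [ih] <;>
        refine Prod.ext ?_ (Prod.ext ?_ ?_) <;> simp <;> omega
    · simp only [List.foldl_cons, cntPref, if_neg hx]
      split_ifs with h1 h2 <;> rw [ih] <;>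
        refine Prod.ext ?_ (Prod.ext ?_ ?_) <;> simp [hx] <;> omega

def onesOf (cs : List Char) (st : Int) : List Int :=
  ((PySem.List.enumerate cs st).filter (fun p => p.2 = '1')).map (·.1)

lemma onesOf_cons (x : Char) (cs : List Char) (st : Int) :
    onesOf (x :: cs) st = if x = '1' then st :: onesOf cs (st + 1) else onesOf cs (st + 1) := by
  by_cases hx : x = '1' <;> simp [onesOf, PySem.List.enumerate_cons, hx]

lemma length_onesOf : ∀ (cs : List Char) (st : Int), (onesOf cs st).length = cs.count '1' := by
  intro cs
  induction cs with
  | nil => intro st; rfl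
  | cons x cs ih =>
    intro st
    rw [onesOf_cons]
    by_cases hx : x = '1' <;> simp [hx, ih]

lemma onesOf_getD : ∀ (cs : List Char) (st : Int) (j : Nat), j + 1 ≤ cs.count '1' →
    (onesOf cs st).getD j 0 = st + posOne (j + 1) cs := by
  intro cs
  induction cs with
  | nil => intro st j h; simp at h
  | cons x cs ih =>
    intro st j h
    rw [onesOf_cons]
    by_cases hx : x = '1'
    · subst hx
      cases j with
      | zero => simp [posOne]
      | succ i =>
        have h' : i + 1 ≤ cs.count '1' := by simp at h; omega
        simp only [reduceIte, List.getD_cons_succ, posOne]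
        rw [ih _ i h', if_neg (by omega : ¬ (i + 1 = 0))]
        ring
    · have h' : j + 1 ≤ cs.count '1' := by simpa [List.count_cons, hx] using h
      simp only [if_neg hx, posOne]
      rw [ih _ j h']
      ring

lemma go_count : ∀ (l : List Char) (fuel acc : Nat), l.length ≤ fuel →
    PySem.Chars.count.go ['1'] fuel l acc = acc + l.count '1' := by
  intro l
  induction l with
  | nil => intro fuel acc _; cases fuel <;> simp [PySem.Chars.count.go]
  | cons x t ih =>
    intro fuel acc h
    cases fuel with
    | zero => simp at h
    | succ f =>
      have ht : t.length ≤ f := by simpa using h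
      by_cases hx : x = '1'
      · subst hx
        simp [PySem.Chars.count.go, List.isPrefixOf, ih f (acc + 1) ht]
        omega
      · have hx' : ¬ '1' = x := fun e => hx e.symm
        simp [PySem.Chars.count.go, List.isPrefixOf, hx', ih f acc ht, hx]

lemma str_count_one (s : String) : PySem.Str.count s "1" = s.toList.count '1' := by
  have h := go_count s.toList s.toList.length 0 le_rfl
  rw [PySem.Str.count_eq]
  show PySem.Chars.count s.toList ['1'] = _
  simpa [PySem.Chars.count] using h


theorem solve_spec : Claim_equal_solve := by
  intro s _
  unfold Spec_solve solve solve_alt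
  have hones : ((PySem.List.enumerate s.toList).filter (fun p => p.2 = '1')).map (·.1)
      = onesOf s.toList 0 := rfl
  simp only [str_count_one, hones, length_onesOf]
  by_cases h3 : PySem.Int.mod ((s.toList.count '1' : Nat) : Int) 3 ≠ 0
  · rw [if_pos h3, if_pos h3]
  · rw [if_neg h3, if_neg h3]
    have hdvd : (3 : Int) ∣ ((s.toList.count '1' : Nat) : Int) := by
      rcases PySem.Int.mod_eq_zero_iff_dvd ((s.toList.count '1' : Nat) : Int) 3 |>.mp
        (by omega) with ⟨q, hq⟩
      exact ⟨q, hq⟩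
    have hdvdN : 3 ∣ s.toList.count '1' := by exact_mod_cast hdvd
    have hfd : PySem.Int.floordiv ((s.toList.count '1' : Nat) : Int) 3
        = ((s.toList.count '1' / 3 : Nat) : Int) := by
      rw [PySem.Int.floordiv_eq_iff_of_pos (by norm_num : (0:Int) < 3)]
      constructor <;> push_cast <;> omega
    rw [hfd]
    by_cases hk : ((s.toList.count '1' / 3 : Nat) : Int) = 0
    · rw [if_pos hk, if_pos hk]
    · rw [if_neg hk, if_neg hk]
      set kN : Nat := s.toList.count '1' / 3 with hkN
      have hk1 : 1 ≤ kN := by omega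
      have hc1 : s.toList.count '1' = 3 * kN := by omega
      rw [loopA ((kN : Nat) : Int) (by exact_mod_cast hk1) s.toList 0 0 0]
      have hlt := cntPref_gap ((kN : Nat) : Int) s.toList (kN - 1) 0
        (by omega) (by omega)
      have hrt := cntPref_gap (2 * ((kN : Nat) : Int)) s.toList (2 * kN - 1) 0
        (by omega) (by omega)
      have e1 : kN - 1 + 2 = kN + 1 := by omega
      have e2 : kN - 1 + 1 = kN := by omega
      have e3 : 2 * kN - 1 + 2 = 2 * kN + 1 := by omega
      have e4 : 2 * kN - 1 + 1 = 2 * kN := by omega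
      rw [e1, e2] at hlt
      rw [e3, e4] at hrt
      -- B's four indices
      have i1 : (PySem.List.pyGetD (onesOf s.toList 0) ((kN : Nat) : Int) 0)
          = 0 + posOne (kN + 1) s.toList := by
        rw [PySem.List.pyGetD_natCast]
        exact onesOf_getD s.toList 0 kN (by omega)
      have i2 : (PySem.List.pyGetD (onesOf s.toList 0) (((kN : Nat) : Int) - 1) 0)
          = 0 + posOne kN s.toList := by
        rw [(by omega : ((kN : Nat) : Int) - 1 = ((kN - 1 : Nat) : Int)),
          PySem.List.pyGetD_natCast]
        rw [onesOf_getD s.toList 0 (kN - 1) (by omega), e2]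
      have i3 : (PySem.List.pyGetD (onesOf s.toList 0) (2 * ((kN : Nat) : Int)) 0)
          = 0 + posOne (2 * kN + 1) s.toList := by
        rw [(by push_cast; omega : 2 * ((kN : Nat) : Int) = ((2 * kN : Nat) : Int)),
          PySem.List.pyGetD_natCast]
        exact onesOf_getD s.toList 0 (2 * kN) (by omega)
      have i4 : (PySem.List.pyGetD (onesOf s.toList 0) (2 * ((kN : Nat) : Int) - 1) 0)
          = 0 + posOne (2 * kN) s.toList := by
        rw [(by omega : 2 * ((kN : Nat) : Int) - 1 = ((2 * kN - 1 : Nat) : Int)),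
          PySem.List.pyGetD_natCast]
        rw [onesOf_getD s.toList 0 (2 * kN - 1) (by omega), e4]
      rw [i1, i2, i3, i4]
      simp [hlt, hrt]
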